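-- pv_equiv track=rewrite | github.com/hlepouse/vasco | level2/app/utils.py | monthsBetween
-- ===== SOURCE A (Python) =====
-- def monthsBetween(startYear, startMonth, endYear, endMonth):
--
--     year = startYear
--     month = startMonth
--
--     while year < endYear or (year == endYear and month <= endMonth):
--
--         yield year,month
--
--         month += 1
--
--         if month == 13:
--             year +=1
--             month = 1
-- ===== SOURCE B (Python) =====
-- def monthsBetween(startYear, startMonth, endYear, endMonth):
--     for year in range(startYear, endYear + 1):
--         first = startMonth if year == startYear else 1
--         last = min(endMonth, 12) if year == endYear else 12
--         for month in range(first, last + 1):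
--             yield year, month
-- ===== Notes on version B (the rewrite author's own statement) =====
-- stated objective: simpler
-- what changed: Replaces the single month-carry while loop (increment month, branch on ==13 to carry into the year) with two nested ranges: an outer range over years and an inner range over that year's months (the final year capped at month 12).
-- intended difference: On same-year calls with startMonth > 12 and startMonth <= endMonth, A yields the fictitious months (year, startMonth)..(year, endMonth) because its loop condition fires without the ==13 carry ever normalizing, while B yields nothing since a year has only months up to 12; returning no months for an out-of-calendar start is the intended reading. — e.g. on monthsBetween(5, 20, 5, 25): A returns [(5, 20), (5, 21), (5, 22), (5, 23), (5, 24), (5, 25)], B returns []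
import Mathlib
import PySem

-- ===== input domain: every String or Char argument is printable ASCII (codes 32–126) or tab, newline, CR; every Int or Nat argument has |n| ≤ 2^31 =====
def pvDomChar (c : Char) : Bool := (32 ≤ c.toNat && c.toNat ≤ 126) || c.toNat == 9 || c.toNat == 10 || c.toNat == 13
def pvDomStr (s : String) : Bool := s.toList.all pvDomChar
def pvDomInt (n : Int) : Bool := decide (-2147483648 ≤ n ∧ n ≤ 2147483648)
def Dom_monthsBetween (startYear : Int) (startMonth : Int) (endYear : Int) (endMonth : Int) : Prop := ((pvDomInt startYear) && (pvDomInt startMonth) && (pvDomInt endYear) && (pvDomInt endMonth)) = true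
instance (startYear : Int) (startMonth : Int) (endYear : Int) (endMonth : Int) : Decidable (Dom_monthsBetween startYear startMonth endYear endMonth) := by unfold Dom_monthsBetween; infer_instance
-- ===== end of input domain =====

-- B replaces A's month-carry while loop with nested year/month ranges (simpler decomposition, same O(n) cost).

-- ===== PORT A =====
-- A's while loop, fuel-based: the fuel only makes the recursion total (A's loop diverges for
-- startMonth > 12 with startYear < endYear, excluded by Pre_; on every input where the Python
-- loop terminates the fuel below exceeds its iteration count, proved in the lemmas).
def monthsBetweenGo (endYear endMonth : Int) : Nat → Int → Int → List (Int × Int)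
  | 0, _, _ => []
  | fuel + 1, year, month =>
    if year < endYear ∨ (year = endYear ∧ month ≤ endMonth) then
      (year, month) ::
        (if month + 1 = 13 then monthsBetweenGo endYear endMonth fuel (year + 1) 1
         else monthsBetweenGo endYear endMonth fuel year (month + 1))
    else []

def monthsBetween (startYear : Int) (startMonth : Int) (endYear : Int) (endMonth : Int) : List (Int × Int) :=
  monthsBetweenGo endYear endMonth
    (((endYear - startYear).toNat + 1) * 13 + (endMonth - startMonth).toNat + (12 - startMonth).toNat + 2)
    startYear startMonth

-- ===== PORT B =====
def monthsBetween_alt (startYear : Int) (startMonth : Int) (endYear : Int) (endMonth : Int) : List (Int × Int) :=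
  (PySem.List.pyRange startYear (endYear + 1) 1).flatMap (fun year =>
    (PySem.List.pyRange (if year = startYear then startMonth else 1)
        ((if year = endYear then min endMonth 12 else 12) + 1) 1).map (fun month => (year, month)))

-- ===== PRECONDITION & SPEC =====
-- Pre_ excludes exactly the inputs on which A's while loop never terminates (the Python
-- generator diverges, returning no value): startMonth > 12 with startYear < endYear, where
-- the '== 13' carry test can never fire again and the year never advances.
def Pre_monthsBetween (startYear : Int) (startMonth : Int) (endYear : Int) (endMonth : Int) : Prop :=
  startMonth ≤ 12 ∨ endYear ≤ startYear
instance (startYear : Int) (startMonth : Int) (endYear : Int) (endMonth : Int) : Decidable (Pre_monthsBetween startYear startMonth endYear endMonth) := by unfold Pre_monthsBetween; infer_instance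
def pvWitness_monthsBetween : Int × Int × Int × Int := (2019, 11, 2020, 2)

-- On same-year calls with startMonth > 12 and startMonth ≤ endMonth, A yields the fictitious
-- months (year, startMonth)..(year, endMonth) because its loop condition fires without the
-- '== 13' carry ever normalizing, while B yields nothing since a year has only months up to
-- 12; returning no months for an out-of-calendar start is the intended reading.
def D_monthsBetween (startYear : Int) (startMonth : Int) (endYear : Int) (endMonth : Int) : Prop :=
  13 ≤ startMonth ∧ startYear = endYear ∧ startMonth ≤ endMonth
instance (startYear : Int) (startMonth : Int) (endYear : Int) (endMonth : Int) : Decidable (D_monthsBetween startYear startMonth endYear endMonth) := by unfold D_monthsBetween; infer_instance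

def Spec_monthsBetween (startYear : Int) (startMonth : Int) (endYear : Int) (endMonth : Int) (out : List (Int × Int)) : Prop := ¬ D_monthsBetween startYear startMonth endYear endMonth → out = monthsBetween_alt startYear startMonth endYear endMonth
instance (startYear : Int) (startMonth : Int) (endYear : Int) (endMonth : Int) (out : List (Int × Int)) : Decidable (Spec_monthsBetween startYear startMonth endYear endMonth out) := by unfold Spec_monthsBetween; infer_instance

def pvDiffWitness_monthsBetween : Int × Int × Int × Int := (5, 20, 5, 25)
def pvDiffWitnessOut_monthsBetween : (List (Int × Int)) × (List (Int × Int)) :=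
  ([(5, 20), (5, 21), (5, 22), (5, 23), (5, 24), (5, 25)], [])

-- ===== CLAIM (what is proved, stated in full; the proofs are below) =====
def Claim_unchanged_monthsBetween : Prop := ∀ (startYear : Int) (startMonth : Int) (endYear : Int) (endMonth : Int), Dom_monthsBetween startYear startMonth endYear endMonth → Pre_monthsBetween startYear startMonth endYear endMonth → Spec_monthsBetween startYear startMonth endYear endMonth (monthsBetween startYear startMonth endYear endMonth)
def Claim_changed_monthsBetween : Prop := Dom_monthsBetween (pvDiffWitness_monthsBetween.1) (pvDiffWitness_monthsBetween.2.1) (pvDiffWitness_monthsBetween.2.2.1) (pvDiffWitness_monthsBetween.2.2.2) ∧ Pre_monthsBetween (pvDiffWitness_monthsBetween.1) (pvDiffWitness_monthsBetween.2.1) (pvDiffWitness_monthsBetween.2.2.1) (pvDiffWitness_monthsBetween.2.2.2) ∧ D_monthsBetween (pvDiffWitness_monthsBetween.1) (pvDiffWitness_monthsBetween.2.1) (pvDiffWitness_monthsBetween.2.2.1) (pvDiffWitness_monthsBetween.2.2.2) ∧ monthsBetween (pvDiffWitness_monthsBetween.1) (pvDiffWitness_monthsBetween.2.1) (pvDiffWitness_monthsBetween.2.2.1)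 (pvDiffWitness_monthsBetween.2.2.2) = pvDiffWitnessOut_monthsBetween.1 ∧ monthsBetween_alt (pvDiffWitness_monthsBetween.1) (pvDiffWitness_monthsBetween.2.1) (pvDiffWitness_monthsBetween.2.2.1) (pvDiffWitness_monthsBetween.2.2.2) = pvDiffWitnessOut_monthsBetween.2 ∧ pvDiffWitnessOut_monthsBetween.1 ≠ pvDiffWitnessOut_monthsBetween.2
def Claim_exact_monthsBetween : Prop := ∀ (startYear : Int) (startMonth : Int) (endYear : Int) (endMonth : Int), Dom_monthsBetween startYear startMonth endYear endMonth → Pre_monthsBetween startYear startMonth endYear endMonth → D_monthsBetween startYear startMonth endYear endMonth → monthsBetween startYear startMonth endYear endMonth ≠ monthsBetween_alt startYear startMonth endYear endMonth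

-- ===== LEMMAS AND PROOFS =====

-- loop invariant: from any reachable, terminating, non-D state (y, m) of A's loop, with
-- enough fuel, the remaining output of A's carry loop is B's per-year range decomposition
-- started at year y with first month m
theorem go_eq_years (eY eM : Int) : ∀ (fuel : Nat) (y m : Int),
    (y < eY → m ≤ 12) → (y = eY → (m ≤ 12 ∨ eM < m)) →
    (eY - y) * 12 + max eM 12 + 1 - m ≤ (fuel : Int) →
    monthsBetweenGo eY eM fuel y m =
      (PySem.List.pyRange y (eY + 1) 1).flatMap (fun z =>
        (PySem.List.pyRange (if z = y then m else 1)
            ((if z = eY then min eM 12 else 12) + 1) 1).map (fun mo => (z, mo))) := by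
  intro fuel
  induction fuel with
  | zero =>
    intro y m hlt heq hfuel
    rcases max_cases eM 12 with ⟨hmax, hle12⟩ | ⟨hmax, hlt12⟩ <;> rw [hmax] at hfuel <;>
      push_cast at hfuel
    all_goals {
      have hy : ¬ y < eY := by intro h; have := hlt h; omega
      rcases lt_or_ge eY y with hgt | hge
      · rw [PySem.List.pyRange_one_eq_nil (by omega)]
        simp [monthsBetweenGo]
      · have hyeq : y = eY := by omega
        subst hyeq
        have hmin : min eM 12 ≤ 12 := min_le_right _ _
        rw [PySem.List.pyRange_one_cons (by omega), PySem.List.pyRange_one_eq_nil (by omega),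
          List.flatMap_cons, List.flatMap_nil, List.append_nil,
          if_pos (show y = y from rfl), if_pos (show y = y from rfl),
          PySem.List.pyRange_one_eq_nil (by omega)]
        simp [monthsBetweenGo] }
  | succ n ih =>
    intro y m hlt heq hfuel
    have hfuel' : (eY - y) * 12 + max eM 12 + 1 - m ≤ (n : Int) + 1 := by
      push_cast at hfuel; exact hfuel
    by_cases hcond : y < eY ∨ (y = eY ∧ m ≤ eM)
    · have hyle : y < eY + 1 := by rcases hcond with h | ⟨h, _⟩ <;> omega
      have hm12 : m ≤ 12 := by
        rcases hcond with h | ⟨h, h2⟩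
        · exact hlt h
        · rcases heq h with h' | h' <;> omega
      have hin : m < (if y = eY then min eM 12 else 12) + 1 := by
        rcases hcond with h | ⟨h, h2⟩
        · rw [if_neg (by omega)]; omega
        · rw [if_pos h]; omega
      -- split off the head (y, m) on both sides
      rw [PySem.List.pyRange_one_cons hyle, List.flatMap_cons,
        if_pos (show y = y from rfl)]
      rw [PySem.List.pyRange_one_cons hin, List.map_cons]
      rw [monthsBetweenGo]
      simp only [if_pos hcond, List.cons_append]
      refine congrArg (List.cons (y, m)) ?_
      by_cases h13 : m + 1 = 13
      · -- carry: m = 12, the rest of year y's inner range is empty; continue at (y + 1, 1)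
        have hm : m = 12 := by omega
        have hrest : (if y = eY then min eM 12 else 12) + 1 ≤ m + 1 := by
          have hmin : min eM 12 ≤ 12 := min_le_right _ _
          split <;> omega
        rw [if_pos h13, PySem.List.pyRange_one_eq_nil hrest, List.map_nil, List.nil_append]
        rw [ih (y + 1) 1 (fun _ => by omega) (fun _ => Or.inl (by omega)) (by
          rcases max_cases eM 12 with ⟨hx, _⟩ | ⟨hx, _⟩ <;> rw [hx] at hfuel' ⊢ <;>
            push_cast <;> omega)]
        refine List.flatMap_congr (fun z hz => ?_)
        have hz1 : y + 1 ≤ z := (PySem.List.mem_pyRange_one.mp hz).1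
        have e1 : (if z = y + 1 then (1 : Int) else 1) = 1 := by split <;> rfl
        have e2 : (if z = y then m else 1) = 1 := if_neg (by omega)
        rw [e1, e2]
      · -- no carry: continue at (y, m + 1) and split off year y's head range again
        rw [if_neg h13]
        rw [ih y (m + 1) (fun _ => by omega) (fun _ => Or.inl (by omega)) (by
          rcases max_cases eM 12 with ⟨hx, _⟩ | ⟨hx, _⟩ <;> rw [hx] at hfuel' ⊢ <;>
            push_cast <;> omega)]
        rw [PySem.List.pyRange_one_cons hyle, List.flatMap_cons,
          if_pos (show y = y from rfl)]
        refine congrArg₂ (· ++ ·) rfl ?_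
        refine List.flatMap_congr (fun z hz => ?_)
        have hz1 : y + 1 ≤ z := (PySem.List.mem_pyRange_one.mp hz).1
        have e1 : (if z = y then m + 1 else 1) = 1 := if_neg (by omega)
        have e2 : (if z = y then m else 1) = 1 := if_neg (by omega)
        rw [e1, e2]
    · -- loop condition false: y > eY (outer range empty) or y = eY with m > eM (inner empty)
      rw [monthsBetweenGo]
      rw [if_neg hcond]
      have h1 : ¬ y < eY := fun h => hcond (Or.inl h)
      rcases lt_or_ge eY y with hgt | hge
      · rw [PySem.List.pyRange_one_eq_nil (by omega)]
        simp
      · have hyeq : y = eY := by omega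
        subst hyeq
        have h2 : ¬ m ≤ eM := fun h => hcond (Or.inr ⟨rfl, h⟩)
        have hmin : min eM 12 ≤ eM := min_le_left _ _
        rw [PySem.List.pyRange_one_cons (by omega), PySem.List.pyRange_one_eq_nil (by omega),
          List.flatMap_cons, List.flatMap_nil, List.append_nil,
          if_pos (show y = y from rfl), if_pos (show y = y from rfl),
          PySem.List.pyRange_one_eq_nil (by omega)]
        simp

-- inside D_ the outputs literally differ: A yields at least its first fictitious month
-- while B's clamped final-year range is empty
theorem alt_nil_of_D (sY sM eY eM : Int) (h13 : 13 ≤ sM) (hyy : sY = eY) :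
    monthsBetween_alt sY sM eY eM = [] := by
  unfold monthsBetween_alt
  subst hyy
  rw [PySem.List.pyRange_one_cons (by omega), PySem.List.pyRange_one_eq_nil (by omega),
    List.flatMap_cons, List.flatMap_nil, List.append_nil,
    if_pos (show sY = sY from rfl), if_pos (show sY = sY from rfl)]
  have hmin : min eM 12 ≤ 12 := min_le_right _ _
  rw [PySem.List.pyRange_one_eq_nil (by omega)]
  simp

-- ===== VERDICT (by name: the statements are the Claim_ definitions above) =====
theorem monthsBetween_spec : Claim_unchanged_monthsBetween := by
  intro sY sM eY eM _hDom hPre hD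
  unfold Pre_monthsBetween at hPre
  unfold D_monthsBetween at hD
  have hD' : sM ≤ 12 ∨ sY ≠ eY ∨ eM < sM := by
    by_contra hc
    push_neg at hc
    exact hD ⟨by omega, by omega, by omega⟩
  unfold monthsBetween monthsBetween_alt
  refine go_eq_years eY eM _ sY sM (fun h => by omega) (fun h => ?_) ?_
  · rcases hD' with h' | h' | h'
    · exact Or.inl h'
    · exact absurd h h'
    · exact Or.inr h'
  · rcases max_cases eM 12 with ⟨hx, _⟩ | ⟨hx, _⟩ <;> rw [hx] <;> push_cast <;> omega

theorem monthsBetween_changed : Claim_changed_monthsBetween := by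
  unfold Claim_changed_monthsBetween; decide

theorem monthsBetween_tight : Claim_exact_monthsBetween := by
  intro sY sM eY eM _hDom _hPre hD
  obtain ⟨h13, hyy, hle⟩ := hD
  rw [alt_nil_of_D sY sM eY eM h13 hyy]
  unfold monthsBetween
  intro hnil
  obtain ⟨k, hk⟩ : ∃ k, ((eY - sY).toNat + 1) * 13 + (eM - sM).toNat + (12 - sM).toNat + 2
      = k + 1 := ⟨_, rfl⟩
  rw [hk, monthsBetweenGo, if_pos (Or.inr ⟨hyy, hle⟩)] at hnil
  exact List.cons_ne_nil _ _ hnil
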